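-- pv_equiv track=rewrite | github.com/mark-mccandless/sentence-validator | sentence-checker.py | is_sentence
-- ===== SOURCE A (Python) =====
-- def is_sentence(string):
--     if not(is_capital(string[0])):
--         return False
--     if not(is_sentence_terminator(string[-1])):
--         return False
--
--     quotation_mark_count = 0
--     previous_character = string[0]
--     digit_run = ""
--     for character in string[1:-2]:
--         if character == '.':
--             return False
--
--         if character == '"':
--             quotation_mark_count += 1
--
--         # Check that numbers less than 13 are spelled out
--         if digit_run != "" and is_digit(character):
--             digit_run += character
--         elif digit_run != "" and is_less_than_thirteen(digit_run):
--             return False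
--         else:
--             digit_run = ""
--         if digit_run == "" and is_digit(character):
--             digit_run = character
--
--         previous_character = character
--
--     if quotation_mark_count % 2 != 0:
--         return False
--
--     return True
--
-- def is_capital(character):
--     return (character >= 'A' and character <= 'Z')
--
-- def is_digit(character):
--     return (character >= '0' and character <= '9')
--
-- def is_sentence_terminator(character):
--     return (character == '.' or character == '!' or character == '?')
--
-- def is_less_than_thirteen(digit_run):
--     numeric_value = int(digit_run)
--     return numeric_value < 13
-- ===== SOURCE B (Python) =====
-- # Sentence validation by separate passes: guard checks on the first and last character,
-- # a period-membership test, a quote-count parity test, and a digit-run scan that requires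
-- # every number below thirteen to be spelled out.
--
-- def is_sentence(string):
--     if not ('A' <= string[0] <= 'Z'):
--         return False
--     if string[-1] not in '.!?':
--         return False
--     middle = string[1:-2]
--     if '.' in middle:
--         return False
--     if middle.count('"') % 2 != 0:
--         return False
--     return all(int(run) >= 13 for run in digit_runs(middle))
--
-- def digit_runs(s):
--     runs = []
--     run = ""
--     for ch in s:
--         if ch.isdigit():
--             run += ch
--         elif run:
--             runs.append(run)
--             run = ""
--     if run:
--         runs.append(run)
--     return runs
-- ===== Notes on version B (the rewrite author's own statement) =====
-- stated objective: idiomatic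
-- what changed: A's single state-machine loop (quote counter, previous character, incremental digit-run buffer with early returns) is replaced by separate passes: two guard checks, a period-membership test, a quote-count parity test, and a digit-run extraction pass checked with all(); Pre_ excludes only the empty string, on which A raises IndexError.
-- intended difference: On otherwise-valid sentences whose slice string[1:-2] ends in a digit run with value < 13 (e.g. 'I am 5x.'), A returns True because its loop only validates a digit run once a following non-digit appears, while B returns False, enforcing the intended spelled-out-small-numbers rule on every digit run. — e.g. on is_sentence("I am 5x."): A returns true, B returns false
import Mathlib
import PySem

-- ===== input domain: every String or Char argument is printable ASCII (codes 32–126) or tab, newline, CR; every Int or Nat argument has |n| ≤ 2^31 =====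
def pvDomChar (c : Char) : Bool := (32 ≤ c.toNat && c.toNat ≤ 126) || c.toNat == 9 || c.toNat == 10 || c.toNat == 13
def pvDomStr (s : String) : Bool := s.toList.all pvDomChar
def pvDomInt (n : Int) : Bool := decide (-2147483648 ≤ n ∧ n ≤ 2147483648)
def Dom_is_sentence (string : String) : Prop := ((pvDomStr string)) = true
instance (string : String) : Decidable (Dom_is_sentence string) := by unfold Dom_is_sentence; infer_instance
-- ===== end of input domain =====

-- B replaces A's single combined state-machine loop by separate passes (guards, period
-- membership, quote count, digit-run scan); B checks every digit run of string[1:-2],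
-- while A never checks a run that reaches the end of that slice (see D_ below).

-- ===== PORT A =====
def py_is_capital (c : Char) : Bool := decide ('A' ≤ c) && decide (c ≤ 'Z')

def py_is_digit (c : Char) : Bool := decide ('0' ≤ c) && decide (c ≤ '9')

def py_is_sentence_terminator (c : Char) : Bool := c == '.' || c == '!' || c == '?'

-- int(digit_run) < 13; 'none' (int() raising ValueError) is unreachable: A only calls it on nonempty digit runs
def py_is_less_than_thirteen (digit_run : List Char) : Bool :=
  match PySem.Int.ofChars? digit_run with
  | some v => decide (v < 13)
  | none => false

-- A's for-loop over string[1:-2] with state (quotation_mark_count, previous_character, digit_run)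
def pvLoopA : List Char → Int → Char → List Char → Bool
  | [], qc, _, _ => if PySem.Int.mod qc 2 != 0 then false else true
  | c :: rest, qc, _prev, dr =>
    if c == '.' then false
    else
      let qc := if c == '"' then qc + 1 else qc
      if (dr != []) && py_is_digit c then
        let dr := dr ++ [c]
        let dr := if (dr == []) && py_is_digit c then [c] else dr
        pvLoopA rest qc c dr
      else if (dr != []) && py_is_less_than_thirteen dr then false
      else
        let dr : List Char := []
        let dr := if (dr == []) && py_is_digit c then [c] else dr
        pvLoopA rest qc c dr

def is_sentence (string : String) : Bool :=
  let cs := string.toList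
  match PySem.List.pyGet? cs 0, PySem.List.pyGet? cs (-1) with
  | some c0, some cl =>
    if !(py_is_capital c0) then false
    else if !(py_is_sentence_terminator cl) then false
    else pvLoopA (PySem.List.slice cs (some 1) (some (-2))) 0 c0 []
  | _, _ => false  -- string[0] raises IndexError on the empty string (outside Pre_)

-- ===== PORT B =====
-- str.isdigit() of one character: exact on the ASCII domain
def pvIsDigitB (c : Char) : Bool := decide ('0' ≤ c) && decide (c ≤ '9')

-- digit_runs: the for-loop with state (runs, run), then the final flush of run
def pvRunsLoop : List Char → List (List Char) → List Char → List (List Char)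
  | [], runs, run => if run != [] then runs ++ [run] else runs
  | c :: s, runs, run =>
    if pvIsDigitB c then pvRunsLoop s runs (run ++ [c])
    else if run != [] then pvRunsLoop s (runs ++ [run]) []
    else pvRunsLoop s runs run

-- int(run) >= 13; 'none' (int() raising ValueError) is unreachable: runs are nonempty digit strings
def pvRunGE13 (run : List Char) : Bool :=
  (PySem.Int.ofChars? run).elim true (fun v => decide (13 ≤ v))

def is_sentence_alt (string : String) : Bool :=
  let cs := string.toList
  match PySem.List.pyGet? cs 0 with
  | none => false  -- string[0] raises IndexError on the empty string (outside Pre_)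
  | some c0 =>
    match PySem.List.pyGet? cs (-1) with
    | none => false
    | some cl =>
      if !(decide ('A' ≤ c0) && decide (c0 ≤ 'Z')) then false
      else if !(PySem.Chars.isIn [cl] ['.', '!', '?']) then false
      else
        let middle := PySem.List.slice cs (some 1) (some (-2))
        if PySem.Chars.isIn ['.'] middle then false
        else if PySem.Int.mod ((PySem.List.count middle '"' : Int)) 2 != 0 then false
        else (pvRunsLoop middle [] []).all pvRunGE13

-- ===== PRECONDITION & SPEC =====
-- Pre_ excludes only the empty string, on which A raises IndexError (string[0]).
def Pre_is_sentence (string : String) : Prop := string ≠ ""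
instance (string : String) : Decidable (Pre_is_sentence string) := by unfold Pre_is_sentence; infer_instance
def pvWitness_is_sentence : String := "Hi!"

-- helpers used only to state D_ (scans of the input; neither port is referenced)
-- the maximal digit runs of a list, left to right
def dRuns (cs : List Char) : List (List Char) :=
  (cs.splitOnP fun c => !c.isDigit).filter fun r => !r.isEmpty

-- On otherwise-valid sentences whose slice string[1:-2] ends in a digit run with value < 13
-- (e.g. "I am 5x."), A returns True because its loop only validates a digit run once a
-- following non-digit appears, while B returns False, enforcing the intended
-- spelled-out-small-numbers rule on every digit run.
def D_is_sentence (string : String) : Prop :=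
  let cs := string.toList
  let m := PySem.List.slice cs (some 1) (some (-2))
  'A' ≤ cs.headI ∧ cs.headI ≤ 'Z' ∧ cs.getLastI ∈ ['.', '!', '?'] ∧
  '.' ∉ m ∧ PySem.Int.mod ((PySem.List.count m '"' : Int)) 2 = 0 ∧
  Char.isDigit m.getLastI = true ∧
  (PySem.Int.ofChars? ((dRuns m).getLastI)).getD 13 < 13 ∧
  ∀ r ∈ (dRuns m).dropLast, 13 ≤ (PySem.Int.ofChars? r).getD 13
instance (string : String) : Decidable (D_is_sentence string) := by unfold D_is_sentence; infer_instance

def Spec_is_sentence (string : String) (out : Bool) : Prop := ¬ D_is_sentence string → out = is_sentence_alt string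
instance (string : String) (out : Bool) : Decidable (Spec_is_sentence string out) := by unfold Spec_is_sentence; infer_instance

def pvDiffWitness_is_sentence : String := "I am 5x."
def pvDiffWitnessOut_is_sentence : Bool × Bool := (true, false)

-- ===== CLAIM =====
def Claim_unchanged_is_sentence : Prop := ∀ (string : String), Dom_is_sentence string → Pre_is_sentence string → Spec_is_sentence string (is_sentence string)
def Claim_changed_is_sentence : Prop := Dom_is_sentence (pvDiffWitness_is_sentence) ∧ Pre_is_sentence (pvDiffWitness_is_sentence) ∧ D_is_sentence (pvDiffWitness_is_sentence) ∧ is_sentence (pvDiffWitness_is_sentence) = pvDiffWitnessOut_is_sentence.1 ∧ is_sentence_alt (pvDiffWitness_is_sentence) = pvDiffWitnessOut_is_sentence.2 ∧ pvDiffWitnessOut_is_sentence.1 ≠ pvDiffWitnessOut_is_sentence.2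
def Claim_exact_is_sentence : Prop := ∀ (string : String), Dom_is_sentence string → Pre_is_sentence string → D_is_sentence string → is_sentence string ≠ is_sentence_alt string

-- ===== LEMMAS AND PROOFS =====

lemma isDigit_eq : Char.isDigit = pvIsDigitB := by
  funext c
  simp only [pvIsDigitB, Char.isDigit]
  rcases c with ⟨v, hv⟩
  simp only [Char.le_def]

lemma ge13_iff (r : List Char) : pvRunGE13 r = true ↔ 13 ≤ (PySem.Int.ofChars? r).getD 13 := by
  cases h : PySem.Int.ofChars? r <;> simp [pvRunGE13, h]

lemma ge13_false_iff (r : List Char) :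
    pvRunGE13 r = false ↔ (PySem.Int.ofChars? r).getD 13 < 13 := by
  rw [← Bool.not_eq_true, ge13_iff]
  omega

lemma pvHead0 {cs : List Char} (h : cs ≠ []) : PySem.List.pyGet? cs 0 = some cs.headI := by
  cases cs with
  | nil => simp at h
  | cons c r => rw [PySem.List.pyGet?_zero]; rfl

lemma pvLastN1 {cs : List Char} (h : cs ≠ []) : PySem.List.pyGet? cs (-1) = some cs.getLastI := by
  rw [PySem.List.pyGet?_neg_one, List.getLastI_eq_getLast?_getD]
  cases hg : cs.getLast? with
  | none => exact absurd (List.getLast?_eq_none_iff.mp hg) h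
  | some x => rfl

lemma pvGet0ne {cs : List Char} {c : Char} (h : PySem.List.pyGet? cs 0 = some c) : cs ≠ [] := by
  intro he
  rw [he] at h
  simp [PySem.List.pyGet?_zero] at h

-- the (possibly empty) maximal digit run at the very end of a list
def dTrail (cs : List Char) : List Char := (cs.reverse.takeWhile pvIsDigitB).reverse

-- the digit-run obligation A's loop still owes, given the pending run dr
def pvRunsOK : List Char → List Char → Bool
  | _, [] => true
  | dr, c :: rest =>
    if (dr != []) && py_is_digit c then pvRunsOK (dr ++ [c]) rest
    else if (dr != []) && py_is_less_than_thirteen dr then false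
    else if py_is_digit c then pvRunsOK [c] rest else pvRunsOK [] rest

-- a bad trailing run: nonempty and with value < 13
def dBad (cs : List Char) : Bool := !(dTrail cs).isEmpty && !pvRunGE13 (dTrail cs)

lemma notDigit_eq : (fun c : Char => !c.isDigit) = (fun c => !pvIsDigitB c) := by
  funext c
  rw [isDigit_eq]

lemma dropWhile_head_false' {p : Char → Bool} : ∀ (l : List Char) (x : Char) (xs : List Char),
    l.dropWhile p = x :: xs → p x = false := by
  intro l
  induction l with
  | nil => intro x xs h; simp [List.dropWhile] at h
  | cons c r ih =>
    intro x xs h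
    by_cases hc : p c = true
    · rw [List.dropWhile_cons, if_pos hc] at h; exact ih _ _ h
    · rw [List.dropWhile_cons, if_neg hc] at h
      cases h; simpa using hc

-- splitOnP at a non-digit boundary: the head chunk is the leading digit run
lemma split_run : ∀ (r : List Char),
    List.splitOnP (fun c => !pvIsDigitB c) r =
      r.takeWhile pvIsDigitB ::
        (match r.dropWhile pvIsDigitB with
         | [] => []
         | _ :: xs => List.splitOnP (fun c => !pvIsDigitB c) xs) := by
  intro r
  induction r with
  | nil => simp [List.splitOnP_nil]
  | cons a t ih =>
    by_cases ha : pvIsDigitB a = true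
    · rw [List.splitOnP_cons, ih]
      simp [ha, List.takeWhile_cons, List.dropWhile_cons]
    · have ha' : pvIsDigitB a = false := by simpa using ha
      rw [List.splitOnP_cons]
      simp [ha', List.takeWhile_cons, List.dropWhile_cons]

lemma dRuns_nil : dRuns [] = [] := by
  simp [dRuns, List.splitOnP_nil]

lemma dRuns_cons (c : Char) (r : List Char) :
    dRuns (c :: r) =
      if pvIsDigitB c then (c :: r.takeWhile pvIsDigitB) :: dRuns (r.dropWhile pvIsDigitB)
      else dRuns r := by
  unfold dRuns
  rw [notDigit_eq, List.splitOnP_cons]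
  by_cases hc : pvIsDigitB c = true
  · rw [if_pos hc]
    simp only [hc, Bool.not_true, Bool.false_eq_true, if_false, split_run r]
    cases hrd : r.dropWhile pvIsDigitB with
    | nil => simp [List.modifyHead, dRuns_nil]
    | cons x xs =>
      have hx : pvIsDigitB x = false := dropWhile_head_false' r x xs hrd
      rw [List.splitOnP_cons]
      simp [List.modifyHead, hx]
  · rw [if_neg hc]
    simp [hc]

-- a list ends in a digit iff its trailing digit run is nonempty
lemma dTrail_ne_iff (cs : List Char) : dTrail cs ≠ [] ↔ Char.isDigit cs.getLastI = true := by
  unfold dTrail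
  cases hrev : cs.reverse with
  | nil =>
    have hcs : cs = [] := by simpa using congrArg List.reverse hrev
    subst hcs
    simp [List.getLastI]
  | cons x xs =>
    have hcs : cs = xs.reverse ++ [x] := by
      have h2 := congrArg List.reverse hrev
      simp at h2
      exact h2
    have hlast : cs.getLastI = x := by
      rw [hcs, List.getLastI_eq_getLast?_getD, List.getLast?_concat]
      rfl
    rw [hlast, List.takeWhile_cons, isDigit_eq]
    cases hx : pvIsDigitB x <;> simp [hx]


lemma pvRunGE13_eq_not_lt13 (r : List Char) : pvRunGE13 r = !py_is_less_than_thirteen r := by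
  cases h : PySem.Int.ofChars? r
  · simp [pvRunGE13, py_is_less_than_thirteen, h]
  · simp only [pvRunGE13, py_is_less_than_thirteen, h, Option.elim, ← decide_not]
    exact decide_eq_decide.mpr (by omega)

lemma singleton_isIn (c : Char) (s : List Char) : PySem.Chars.isIn [c] s = s.contains c := by
  cases h : PySem.Chars.isIn [c] s
  · rw [PySem.Chars.isIn_eq_false_iff] at h
    rw [eq_comm]
    simp only [List.contains_eq_mem, decide_eq_false_iff_not]
    intro hm
    obtain ⟨l1, l2, rfl⟩ := List.append_of_mem hm
    exact h ⟨l1, l2, by simp⟩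
  · rw [PySem.Chars.isIn_iff_infix] at h
    obtain ⟨t, u, rfl⟩ := h
    simp

lemma pvLoopA_eq (cs : List Char) (qc : Int) (prev : Char) (dr : List Char) :
    pvLoopA cs qc prev dr =
      ((!cs.contains '.') && (PySem.Int.mod (qc + (cs.count '"' : Int)) 2 == 0) && pvRunsOK dr cs) := by
  induction cs generalizing qc prev dr with
  | nil =>
    simp only [pvLoopA, pvRunsOK, List.count_nil, List.contains_nil, bne]
    rw [PySem.Int.mod_eq_emod_of_pos (by norm_num)]
    rcases Int.emod_two_eq qc with h | h <;> simp [h]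
  | cons c rest ih =>
    by_cases hdot : c = '.'
    · simp [pvLoopA, pvRunsOK, hdot]
    · have hC : (c == '.') = false := by simp [hdot]
      have hcnt : (if c == '"' then qc + 1 else qc) + ((rest.count '"' : Int)) =
          qc + (((c :: rest).count '"' : Int)) := by
        by_cases h : c = '"' <;> simp [List.count_cons, h] <;> push_cast <;> ring
      by_cases h1 : ((dr != []) && py_is_digit c) = true
      · simp only [pvLoopA, pvRunsOK, hC, Bool.false_eq_true, if_false, h1, if_true]
        have hne : ((dr ++ [c] == []) && py_is_digit c) = false := by simp
        rw [hne]
        simp only [Bool.false_eq_true, if_false, ih, hcnt]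
        simp [eq_comm, hdot]
      · by_cases h2 : ((dr != []) && py_is_less_than_thirteen dr) = true
        · simp [pvLoopA, pvRunsOK, hC, h1, h2]
        · by_cases h3 : py_is_digit c = true
          · simp only [pvLoopA, pvRunsOK, hC, Bool.false_eq_true, if_false, h1, h2,
              List.nil_append, beq_self_eq_true, Bool.true_and, h3, if_true, ih, hcnt]
            have hdr : dr = [] := by
              simp [h3] at h1; exact h1
            simp [hdr, eq_comm, hdot]
          · simp only [pvLoopA, pvRunsOK, hC, Bool.false_eq_true, if_false, h1, h2,
              List.nil_append, beq_self_eq_true, Bool.true_and, h3, ih, hcnt]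
            simp [eq_comm, hdot]

lemma pvRunsOK_ne (cs : List Char) : ∀ (dr : List Char), dr ≠ [] →
    pvRunsOK dr cs =
      (if cs.dropWhile py_is_digit = [] then true
       else (!py_is_less_than_thirteen (dr ++ cs.takeWhile py_is_digit)) &&
            pvRunsOK [] (cs.dropWhile py_is_digit)) := by
  induction cs with
  | nil => intro dr h; simp [pvRunsOK]
  | cons c rest ih =>
    intro dr h
    by_cases hc : py_is_digit c = true
    · have e : pvRunsOK dr (c :: rest) = pvRunsOK (dr ++ [c]) rest := by
        simp [pvRunsOK, h, hc]
      rw [e, ih _ (by simp)]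
      simp [List.dropWhile_cons, List.takeWhile_cons, hc]
    · have e : pvRunsOK dr (c :: rest) =
          if py_is_less_than_thirteen dr then false else pvRunsOK [] rest := by
        simp [pvRunsOK, h, hc]
      have e2 : pvRunsOK [] (c :: rest) = pvRunsOK [] rest := by
        simp [pvRunsOK, hc]
      rw [e]
      simp only [List.dropWhile_cons, List.takeWhile_cons, hc, Bool.false_eq_true, if_false]
      cases hlt : py_is_less_than_thirteen dr <;>
        simp [hlt, e2, List.cons_ne_nil]

lemma digitB_eq : py_is_digit = pvIsDigitB := rfl

-- pvRunsLoop with a nonempty pending run: absorb the leading digits, then flush the run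
lemma pvRunsLoop_pending (cs : List Char) : ∀ (runs : List (List Char)) (run : List Char), run ≠ [] →
    pvRunsLoop cs runs run =
      pvRunsLoop (cs.dropWhile pvIsDigitB) (runs ++ [run ++ cs.takeWhile pvIsDigitB]) [] := by
  induction cs with
  | nil => intro runs run h; simp [pvRunsLoop, h]
  | cons c s ih =>
    intro runs run h
    by_cases hc : pvIsDigitB c = true
    · have e : pvRunsLoop (c :: s) runs run = pvRunsLoop s runs (run ++ [c]) := by
        simp [pvRunsLoop, hc]
      rw [e, ih _ _ (by simp), List.dropWhile_cons, List.takeWhile_cons]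
      simp [hc]
    · have e : pvRunsLoop (c :: s) runs run = pvRunsLoop s (runs ++ [run]) [] := by
        simp [pvRunsLoop, hc, h]
      have e2 : pvRunsLoop (c :: s) (runs ++ [run]) [] = pvRunsLoop s (runs ++ [run]) [] := by
        simp [pvRunsLoop, hc]
      rw [e, List.dropWhile_cons, List.takeWhile_cons]
      simp [hc, e2]

lemma pvRunsLoop_eq_dRuns_aux : ∀ (n : Nat) (cs : List Char), cs.length ≤ n →
    ∀ (runs : List (List Char)), pvRunsLoop cs runs [] = runs ++ dRuns cs := by
  intro n
  induction n with
  | zero =>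
    intro cs h runs
    match cs with
    | [] => simp [pvRunsLoop, dRuns_nil]
    | c :: r => simp at h
  | succ n ih =>
    intro cs h runs
    match cs with
    | [] => simp [pvRunsLoop, dRuns_nil]
    | c :: r =>
      by_cases hc : pvIsDigitB c = true
      · have e : pvRunsLoop (c :: r) runs [] = pvRunsLoop r runs ([] ++ [c]) := by
          simp [pvRunsLoop, hc]
        have hlen : (r.dropWhile pvIsDigitB).length ≤ n := by
          have := (r.dropWhile_sublist pvIsDigitB).length_le
          simp at h; omega
        rw [e, pvRunsLoop_pending _ _ _ (by simp), ih _ hlen, dRuns_cons]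
        simp [hc]
      · have e : pvRunsLoop (c :: r) runs [] = pvRunsLoop r runs [] := by
          simp [pvRunsLoop, hc]
        have hlen : r.length ≤ n := by simp at h; omega
        rw [e, ih _ hlen, dRuns_cons]
        simp [hc]

lemma pvRunsLoop_eq_dRuns (cs : List Char) : pvRunsLoop cs [] [] = dRuns cs :=
  by simpa using pvRunsLoop_eq_dRuns_aux cs.length cs le_rfl []

lemma tw_append (p : Char → Bool) (l m : List Char) :
    (l ++ m).takeWhile p = if l.all p then l ++ m.takeWhile p else l.takeWhile p := by
  induction l with
  | nil => simp
  | cons c r ih =>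
    by_cases hc : p c <;> simp [hc, ih] <;> split_ifs <;> simp

lemma dTrail_all {l : List Char} (h : ∀ a ∈ l, pvIsDigitB a = true) : dTrail l = l := by
  unfold dTrail
  rw [List.takeWhile_eq_self_iff.mpr (by simpa using h)]
  simp

lemma dTrail_append (m l : List Char) (h : ∃ a ∈ l, pvIsDigitB a = false) :
    dTrail (m ++ l) = dTrail l := by
  unfold dTrail
  rw [List.reverse_append, tw_append]
  have : l.reverse.all pvIsDigitB = false := by
    obtain ⟨a, ha, hd⟩ := h
    simp only [List.all_eq_false]
    exact ⟨a, by simpa using ha, by simp [hd]⟩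
  simp [this]

lemma dTrail_cons_nondigit {c : Char} {r : List Char} (h : pvIsDigitB c = false) :
    dTrail (c :: r) = dTrail r := by
  unfold dTrail
  have e : (c :: r).reverse = r.reverse ++ [c] := by simp
  rw [e, tw_append]
  by_cases ha : r.reverse.all pvIsDigitB = true
  · have h1 : List.takeWhile pvIsDigitB r.reverse = r.reverse :=
      List.takeWhile_eq_self_iff.mpr (List.all_eq_true.mp ha)
    rw [if_pos ha, h1]
    simp [List.takeWhile_cons, h]
  · simp [eq_false_of_ne_true ha]

lemma dropWhile_head_false {p : Char → Bool} : ∀ (l : List Char) (x : Char) (xs : List Char),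
    l.dropWhile p = x :: xs → p x = false := by
  intro l
  induction l with
  | nil => intro x xs h; simp [List.dropWhile] at h
  | cons c r ih =>
    intro x xs h
    by_cases hc : p c = true
    · rw [List.dropWhile_cons, if_pos hc] at h; exact ih _ _ h
    · rw [List.dropWhile_cons, if_neg hc] at h
      cases h; simpa using hc

-- key bridge: B's all-runs check = A's owed check && no bad trailing run
lemma all_dRuns_eq_aux : ∀ (n : Nat) (cs : List Char), cs.length ≤ n →
    (dRuns cs).all pvRunGE13 = (pvRunsOK [] cs && !dBad cs) := by
  intro n
  induction n with
  | zero =>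
    intro cs h
    match cs with
    | [] => simp [dRuns_nil, pvRunsOK, dBad, dTrail]
    | c :: r => simp at h
  | succ n ih =>
    intro cs h
    match cs with
    | [] => simp [dRuns_nil, pvRunsOK, dBad, dTrail]
    | c :: r =>
      by_cases hc : pvIsDigitB c = true
      · have hR : pvRunsOK [] (c :: r) = pvRunsOK [c] r := by
          simp [pvRunsOK, digitB_eq, hc]
        by_cases hrd : r.dropWhile pvIsDigitB = []
        · -- the whole list is one trailing digit run
          have ht : r.takeWhile pvIsDigitB = r := by
            conv_rhs => rw [← List.takeWhile_append_dropWhile (p := pvIsDigitB) (l := r)]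
            simp [hrd]
          have hall : ∀ a ∈ c :: r, pvIsDigitB a = true := by
            intro a ha
            rcases List.mem_cons.mp ha with rfl | ha
            · exact hc
            · exact List.mem_takeWhile_imp (by rwa [ht])
          rw [hR, pvRunsOK_ne _ _ (by simp), dRuns_cons]
          simp only [hc, if_true, digitB_eq, hrd, if_pos rfl, ht, dRuns_nil, dBad]
          rw [dTrail_all hall]
          simp [pvRunGE13_eq_not_lt13]
        · obtain ⟨x, xs, hx⟩ := List.exists_cons_of_ne_nil hrd
          have hxd : pvIsDigitB x = false := dropWhile_head_false r x xs hx
          have hlen : (r.dropWhile pvIsDigitB).length ≤ n := by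
            have := (r.dropWhile_sublist pvIsDigitB).length_le
            simp at h; omega
          have hsplit : c :: r = (c :: r.takeWhile pvIsDigitB) ++ r.dropWhile pvIsDigitB := by
            simp [List.takeWhile_append_dropWhile]
          have htr : dTrail (c :: r) = dTrail (r.dropWhile pvIsDigitB) := by
            conv_lhs => rw [hsplit]
            exact dTrail_append _ _ ⟨x, by rw [hx]; simp, hxd⟩
          have hbad : dBad (c :: r) = dBad (r.dropWhile pvIsDigitB) := by
            simp [dBad, htr]
          rw [hR, pvRunsOK_ne _ _ (by simp), dRuns_cons]
          simp only [hc, if_true, digitB_eq, List.all_cons, List.singleton_append,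
            pvRunGE13_eq_not_lt13, hbad, ih _ hlen, if_neg hrd]
          cases py_is_less_than_thirteen (c :: r.takeWhile pvIsDigitB) <;>
            cases pvRunsOK [] (r.dropWhile pvIsDigitB) <;>
            cases dBad (r.dropWhile pvIsDigitB) <;> simp
      · have hR : pvRunsOK [] (c :: r) = pvRunsOK [] r := by
          simp [pvRunsOK, digitB_eq, hc]
        have hlen : r.length ≤ n := by simp at h; omega
        have hbad : dBad (c :: r) = dBad r := by simp [dBad, dTrail_cons_nondigit (by simpa using hc)]
        rw [hR, dRuns_cons]
        simp only [hc, if_neg (by simp [hc] : ¬ pvIsDigitB c = true), Bool.false_eq_true,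
          if_false, hbad]
        exact ih _ hlen

lemma all_dRuns_eq (cs : List Char) :
    (dRuns cs).all pvRunGE13 = (pvRunsOK [] cs && !dBad cs) :=
  all_dRuns_eq_aux cs.length cs le_rfl

lemma getLastI_cons_ne {a : List Char} {l : List (List Char)} (h : l ≠ []) :
    (a :: l).getLastI = l.getLastI := by
  cases l with
  | nil => exact absurd rfl h
  | cons b t =>
    rw [List.getLastI_eq_getLast?_getD, List.getLastI_eq_getLast?_getD,
      List.getLast?_cons_cons]

-- when the list ends in a digit run, that run is the last of its digit runs
lemma dRuns_getLast_aux : ∀ (n : Nat) (cs : List Char), cs.length ≤ n → dTrail cs ≠ [] →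
    dRuns cs ≠ [] ∧ (dRuns cs).getLastI = dTrail cs ∧
      pvRunsOK [] cs = (dRuns cs).dropLast.all pvRunGE13 := by
  intro n
  induction n with
  | zero =>
    intro cs h htr
    match cs with
    | [] => simp [dTrail] at htr
    | c :: r => simp at h
  | succ n ih =>
    intro cs h htr
    match cs with
    | [] => simp [dTrail] at htr
    | c :: r =>
      by_cases hc : pvIsDigitB c = true
      · have hR : pvRunsOK [] (c :: r) = pvRunsOK [c] r := by
          simp [pvRunsOK, digitB_eq, hc]
        by_cases hrd : r.dropWhile pvIsDigitB = []
        · have ht : r.takeWhile pvIsDigitB = r := by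
            conv_rhs => rw [← List.takeWhile_append_dropWhile (p := pvIsDigitB) (l := r)]
            simp [hrd]
          have hall : ∀ a ∈ c :: r, pvIsDigitB a = true := by
            intro a ha
            rcases List.mem_cons.mp ha with rfl | ha
            · exact hc
            · exact List.mem_takeWhile_imp (by rwa [ht])
          rw [hR, pvRunsOK_ne _ _ (by simp), dRuns_cons]
          simp [hc, digitB_eq, hrd, dRuns_nil, ht, dTrail_all hall, List.getLastI]
        · obtain ⟨x, xs, hx⟩ := List.exists_cons_of_ne_nil hrd
          have hxd : pvIsDigitB x = false := dropWhile_head_false r x xs hx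
          have hlen : (r.dropWhile pvIsDigitB).length ≤ n := by
            have := (r.dropWhile_sublist pvIsDigitB).length_le
            simp at h; omega
          have hsplit : c :: r = (c :: r.takeWhile pvIsDigitB) ++ r.dropWhile pvIsDigitB := by
            simp [List.takeWhile_append_dropWhile]
          have htr2 : dTrail (r.dropWhile pvIsDigitB) ≠ [] := by
            rw [← dTrail_append (c :: r.takeWhile pvIsDigitB) _ ⟨x, by rw [hx]; simp, hxd⟩,
              ← hsplit]
            exact htr
          have htra : dTrail (c :: r) = dTrail (r.dropWhile pvIsDigitB) := by
            conv_lhs => rw [hsplit]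
            exact dTrail_append _ _ ⟨x, by rw [hx]; simp, hxd⟩
          obtain ⟨hne, hlast, heq⟩ := ih _ hlen htr2
          refine ⟨?_, ?_, ?_⟩
          · rw [dRuns_cons]; simp [hc]
          · rw [dRuns_cons]
            simp only [hc, if_true, getLastI_cons_ne hne, hlast, htra]
          · rw [hR, pvRunsOK_ne _ _ (by simp), dRuns_cons]
            simp only [hc, if_true, digitB_eq, if_neg hrd]
            rw [List.dropLast_cons_of_ne_nil hne, List.all_cons, heq,
              pvRunGE13_eq_not_lt13, List.singleton_append]
      · have hR : pvRunsOK [] (c :: r) = pvRunsOK [] r := by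
          simp [pvRunsOK, digitB_eq, hc]
        have hlen : r.length ≤ n := by simp at h; omega
        have htr2 : dTrail r ≠ [] := by rwa [dTrail_cons_nondigit (by simpa using hc)] at htr
        obtain ⟨hne, hlast, heq⟩ := ih _ hlen htr2
        rw [dRuns_cons]
        simp only [hc, Bool.false_eq_true, if_false]
        rw [dTrail_cons_nondigit (by simpa using hc)]
        exact ⟨hne, hlast, by rw [hR, heq]⟩

lemma dRuns_getLast (cs : List Char) (htr : dTrail cs ≠ []) :
    dRuns cs ≠ [] ∧ (dRuns cs).getLastI = dTrail cs ∧
      pvRunsOK [] cs = (dRuns cs).dropLast.all pvRunGE13 :=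
  dRuns_getLast_aux cs.length cs le_rfl htr

-- the shared guard structure of both ports, parameterised by the digit-run verdict
def pvCanon (s : String) (X : List Char → Bool) : Bool :=
  match PySem.List.pyGet? s.toList 0, PySem.List.pyGet? s.toList (-1) with
  | some c0, some cl =>
    if !(py_is_capital c0) then false
    else if !(py_is_sentence_terminator cl) then false
    else
      let m := PySem.List.slice s.toList (some 1) (some (-2))
      if m.contains '.' then false
      else if PySem.Int.mod ((PySem.List.count m '"' : Int)) 2 != 0 then false
      else X m
  | _, _ => false

lemma count_cast (m : List Char) : (PySem.List.count m '"' : Int) = ((m.count '"' : Int)) := by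
  simp [PySem.List.count]

lemma portA_canon (s : String) : is_sentence s = pvCanon s (fun m => pvRunsOK [] m) := by
  unfold is_sentence pvCanon
  cases h0 : PySem.List.pyGet? s.toList 0 with
  | none => cases h1 : PySem.List.pyGet? s.toList (-1) <;> simp [h0, h1]
  | some c0 =>
    cases h1 : PySem.List.pyGet? s.toList (-1) with
    | none => simp [h0, h1]
    | some cl =>
      simp only [h0, h1]
      rw [pvLoopA_eq, count_cast]
      cases py_is_capital c0 <;> cases py_is_sentence_terminator cl <;>
        simp only [Bool.not_true, Bool.not_false, if_true, if_false, Bool.false_eq_true]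
      set m := PySem.List.slice s.toList (some 1) (some (-2)) with hm
      cases hd : m.contains '.' with
      | true => simp [hd]
      | false =>
        simp only [hd, Bool.not_false, Bool.true_and, Bool.false_eq_true, if_false]
        rw [zero_add]
        generalize PySem.Int.mod ((m.count '"' : Int)) 2 = q
        cases hq : (q == 0) <;> simp [bne, hq]

lemma portB_canon (s : String) :
    is_sentence_alt s = pvCanon s (fun m => pvRunsOK [] m && !dBad m) := by
  unfold is_sentence_alt pvCanon
  cases h0 : PySem.List.pyGet? s.toList 0 with
  | none => cases h1 : PySem.List.pyGet? s.toList (-1) <;> simp [h0, h1]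
  | some c0 =>
    cases h1 : PySem.List.pyGet? s.toList (-1) with
    | none => simp [h0, h1]
    | some cl =>
      simp only [h0, h1]
      have hcap : (!(decide ('A' ≤ c0) && decide (c0 ≤ 'Z'))) = (!py_is_capital c0) := rfl
      have hterm : PySem.Chars.isIn [cl] ['.', '!', '?'] = py_is_sentence_terminator cl := by
        rw [singleton_isIn]
        by_cases e1 : cl = '.' <;> by_cases e2 : cl = '!' <;> by_cases e3 : cl = '?' <;>
          simp [e1, e2, e3, py_is_sentence_terminator, List.contains_eq_mem]
      rw [hcap, hterm, singleton_isIn, pvRunsLoop_eq_dRuns, all_dRuns_eq]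

-- ===== VERDICT =====
theorem is_sentence_spec : Claim_unchanged_is_sentence := by
  intro s _hdom _hpre hD
  rw [portA_canon, portB_canon]
  unfold pvCanon
  cases h0 : PySem.List.pyGet? s.toList 0 with
  | none => cases h1 : PySem.List.pyGet? s.toList (-1) <;> simp [h0, h1]
  | some c0 =>
    cases h1 : PySem.List.pyGet? s.toList (-1) with
    | none => simp [h0, h1]
    | some cl =>
      simp only [h0, h1]
      cases hcap : py_is_capital c0 <;> cases hterm : py_is_sentence_terminator cl <;>
        simp only [Bool.not_true, Bool.not_false, if_true, if_false, Bool.false_eq_true]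
      set m := PySem.List.slice s.toList (some 1) (some (-2)) with hm
      cases hd : m.contains '.' with
      | true => simp
      | false =>
        simp only [Bool.false_eq_true, if_false]
        cases hq : (PySem.Int.mod ((PySem.List.count m '"' : Int)) 2 != 0) with
        | true => simp
        | false =>
          simp only [Bool.false_eq_true, if_false]
          cases hbad : dBad m with
          | false => simp [hbad]
          | true =>
            -- ¬ D_ forces the non-final digit-run check to fail, so both sides are false
            have hbad' : (dTrail m).isEmpty = false ∧ pvRunGE13 (dTrail m) = false := by
              have := hbad
              rw [dBad] at this
              cases hb1 : (dTrail m).isEmpty <;> cases hb2 : pvRunGE13 (dTrail m) <;>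
                rw [hb1, hb2] at this <;> simp_all
            have htr : dTrail m ≠ [] := by
              intro he
              rw [he] at hbad'
              simp at hbad'
            have hge : pvRunGE13 (dTrail m) = false := hbad'.2
            obtain ⟨hrne, hrlast, hreq⟩ := dRuns_getLast m htr
            have hdl : (dRuns m).dropLast.all pvRunGE13 = false := by
              by_contra hne
              apply hD
              have hne0 : s.toList ≠ [] := pvGet0ne h0
              have hc0 : c0 = s.toList.headI := by
                rw [pvHead0 hne0] at h0
                exact (Option.some.injEq _ _ ▸ h0).symm
              have hcl : cl = s.toList.getLastI := by
                rw [pvLastN1 hne0] at h1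
                exact (Option.some.injEq _ _ ▸ h1).symm
              have hcap2 : 'A' ≤ c0 ∧ c0 ≤ 'Z' := by simpa [py_is_capital] using hcap
              refine ⟨hc0 ▸ hcap2.1, hc0 ▸ hcap2.2, ?_,
                by rw [← hm]; simpa using hd, ?_,
                by rw [← hm]; exact (dTrail_ne_iff m).mp htr, ?_, ?_⟩
              · rw [← hcl]
                simpa [py_is_sentence_terminator, or_assoc] using hterm
              · rw [← hm]
                simp only [bne, Bool.not_eq_eq_eq_not, Bool.not_false, beq_iff_eq] at hq
                exact hq
              · rw [← hm, hrlast, ← ge13_false_iff]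
                exact hge
              · intro r hr
                rw [← ge13_iff]
                exact List.all_eq_true.mp ((Bool.not_eq_false _).mp hne) r
                  (by rw [← hm] at hr; exact hr)
            rw [hreq, hdl]
            simp

theorem is_sentence_changed : Claim_changed_is_sentence := by
  unfold Claim_changed_is_sentence
  decide

theorem is_sentence_tight : Claim_exact_is_sentence := by
  intro s _hdom _hpre hD
  obtain ⟨hA1, hA2, hlast, hd, hq, hdig, hlt, hdl⟩ := hD
  rw [portA_canon, portB_canon]
  unfold pvCanon
  have hne0 : s.toList ≠ [] := by
    intro he
    rw [he] at hlast
    exact absurd hlast (by decide)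
  have h0 : PySem.List.pyGet? s.toList 0 = some s.toList.headI := pvHead0 hne0
  have h1 : PySem.List.pyGet? s.toList (-1) = some s.toList.getLastI := pvLastN1 hne0
  have hcap' : py_is_capital s.toList.headI = true := by simp [py_is_capital, hA1, hA2]
  have hterm' : py_is_sentence_terminator s.toList.getLastI = true := by
    have h2 : s.toList.getLastI = '.' ∨ s.toList.getLastI = '!' ∨ s.toList.getLastI = '?' := by
      simpa using hlast
    rcases h2 with h | h | h <;> simp [py_is_sentence_terminator, h]
  rw [h0, h1]
  simp only [hcap', hterm', Bool.not_true, Bool.false_eq_true, if_false]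
  set m := PySem.List.slice s.toList (some 1) (some (-2)) with hm
  have htr : dTrail m ≠ [] := (dTrail_ne_iff m).mpr hdig
  obtain ⟨hrne, hrlast, hreq⟩ := dRuns_getLast m htr
  have hge' : pvRunGE13 (dTrail m) = false := (ge13_false_iff _).mpr (hrlast ▸ hlt)
  have hdl' : (dRuns m).dropLast.all pvRunGE13 = true := by
    rw [List.all_eq_true]
    intro r hr
    rw [ge13_iff]
    exact hdl r hr
  have hbad : dBad m = true := by
    rw [dBad, hge']
    simp [htr, List.isEmpty_iff]
  rw [hreq, hdl']
  have hdvd : (2 : Int) ∣ ((List.count '"' m : Int)) := by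
    rw [count_cast] at hq
    rw [PySem.Int.mod_eq_emod_of_pos (by norm_num)] at hq
    exact Int.dvd_of_emod_eq_zero hq
  simp [hd, hdvd, hbad]
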